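-- pv_equiv track=rewrite | github.com/timofeiryko/edawesome | edawesome/pd_apply.py | multi_replace
-- ===== SOURCE A (Python) =====
-- from typing import Dict, List, Optional, Sequence
--
-- def multi_replace(
--     row: str, mapper: Dict[str, Sequence[str]],
--     default: Optional[str] = None
-- ) -> str:
--     """Replace a string with another string based on a mapper."""
--
--     if default is None:
--         default = row
--
--     for output_str, inputs in mapper.items():
--         if row in inputs:
--             return output_str
--
--     return default
-- ===== SOURCE B (Python) =====
-- from typing import Dict, List, Optional, Sequence
--
-- def multi_replace(
--     row: str, mapper: Dict[str, Sequence[str]],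
--     default: Optional[str] = None
-- ) -> str:
--     """Replace a string via an up-front reverse index (first mapper entry wins)."""
--     reverse = {}
--     for output_str, inputs in mapper.items():
--         for s in inputs:
--             reverse.setdefault(s, output_str)
--     return reverse.get(row, row if default is None else default)
-- ===== Notes on version B (the rewrite author's own statement) =====
-- stated objective: idiomatic
-- what changed: B builds a reverse lookup dict once (setdefault so the first mapper entry wins) and answers with a single dict.get with default, instead of A's linear scan over mapper with membership tests and early return.
import Mathlib
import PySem

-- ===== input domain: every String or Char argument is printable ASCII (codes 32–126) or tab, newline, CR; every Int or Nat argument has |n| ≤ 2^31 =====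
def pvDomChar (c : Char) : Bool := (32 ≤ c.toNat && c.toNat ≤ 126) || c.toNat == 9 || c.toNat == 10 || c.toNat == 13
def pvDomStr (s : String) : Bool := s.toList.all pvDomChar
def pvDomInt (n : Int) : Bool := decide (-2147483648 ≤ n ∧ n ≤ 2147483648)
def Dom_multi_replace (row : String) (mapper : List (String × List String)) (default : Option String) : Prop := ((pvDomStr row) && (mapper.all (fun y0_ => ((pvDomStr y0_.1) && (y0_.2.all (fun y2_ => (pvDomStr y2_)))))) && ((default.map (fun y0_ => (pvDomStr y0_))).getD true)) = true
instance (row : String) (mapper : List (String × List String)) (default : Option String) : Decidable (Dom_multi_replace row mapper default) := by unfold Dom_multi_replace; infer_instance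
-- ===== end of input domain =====

-- B replaces A's linear scan over mapper with membership tests by an up-front reverse
-- lookup dict (setdefault: first mapper entry wins) plus one dict lookup with default; idiomatic.


-- ===== PORT A =====
-- the for-loop with early return over mapper.items()
def mrLoopA (row : String) (mapper : List (String × List String)) (default : String) : String :=
  match mapper with
  | [] => default
  | (output_str, inputs) :: rest =>
      if row ∈ inputs then output_str else mrLoopA row rest default

def multi_replace (row : String) (mapper : List (String × List String)) (default : Option String) : String :=
  let default := match default with | none => row | some d => d
  mrLoopA row mapper default

-- ===== PORT B =====
-- reverse = {}; for output_str, inputs in mapper.items(): for s in inputs: reverse.setdefault(s, output_str)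
def mrReverse (mapper : List (String × List String)) : PySem.Dict String String :=
  mapper.foldl (fun acc p => p.2.foldl (fun a s => a.setdefault s p.1) acc) PySem.Dict.empty

def multi_replace_alt (row : String) (mapper : List (String × List String)) (default : Option String) : String :=
  (mrReverse mapper).getD row (match default with | none => row | some d => d)

-- ===== PRECONDITION & SPEC =====
def Spec_multi_replace (row : String) (mapper : List (String × List String)) (default : Option String) (out : String) : Prop := out = multi_replace_alt row mapper default
instance (row : String) (mapper : List (String × List String)) (default : Option String) (out : String) : Decidable (Spec_multi_replace row mapper default out) := by unfold Spec_multi_replace; infer_instance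

-- ===== CLAIM (what is proved, stated in full; the proofs are below) =====
def Claim_equal_multi_replace : Prop := ∀ (row : String) (mapper : List (String × List String)) (default : Option String), Dom_multi_replace row mapper default → Spec_multi_replace row mapper default (multi_replace row mapper default)

-- ===== LEMMAS AND PROOFS =====

-- first match of row among the mapper entries, as A scans them
def mrFirst (row : String) : List (String × List String) → Option String
  | [] => none
  | (o, inputs) :: rest => if row ∈ inputs then some o else mrFirst row rest

theorem mrLoopA_eq_first (row : String) (mapper : List (String × List String)) (d : String) :
    mrLoopA row mapper d = (mrFirst row mapper).getD d := by
  induction mapper with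
  | nil => rfl
  | cons p rest ih =>
      obtain ⟨o, inputs⟩ := p
      simp only [mrLoopA, mrFirst]
      split_ifs with h <;> simp [ih]

theorem get?_setdefault_fold (row o : String) (inputs : List String)
    (a : PySem.Dict String String) :
    (inputs.foldl (fun a s => a.setdefault s o) a).get? row =
      (a.get? row).or (if row ∈ inputs then some o else none) := by
  induction inputs generalizing a with
  | nil => simp
  | cons s rest ih =>
      simp only [List.foldl_cons]
      rw [ih]
      by_cases hc : a.contains s = true
      · rw [PySem.Dict.setdefault_of_contains a o hc]
        by_cases hrs : row = s
        · subst hrs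
          have : (a.get? row).isSome := by
            rw [← PySem.Dict.contains_eq_isSome_get?]; exact hc
          obtain ⟨v, hv⟩ := Option.isSome_iff_exists.mp this
          simp [hv]
        · simp [List.mem_cons, hrs]
      · have hc' : a.contains s = false := by simpa using hc
        rw [PySem.Dict.setdefault_of_not_contains a o hc']
        rw [PySem.Dict.get?_insert]
        by_cases hrs : row = s
        · subst hrs
          have hnone : a.get? row = none := by
            rw [PySem.Dict.get?_eq_none_iff_contains]; exact hc'
          simp [hnone]
        · simp [hrs, List.mem_cons]

theorem get?_mrReverse_aux (row : String) (mapper : List (String × List String))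
    (a : PySem.Dict String String) :
    (mapper.foldl (fun acc p => p.2.foldl (fun a s => a.setdefault s p.1) acc) a).get? row =
      (a.get? row).or (mrFirst row mapper) := by
  induction mapper generalizing a with
  | nil => simp [mrFirst]
  | cons p rest ih =>
      obtain ⟨o, inputs⟩ := p
      simp only [List.foldl_cons]
      rw [ih, get?_setdefault_fold, Option.or_assoc]
      simp only [mrFirst]
      split_ifs with h
      · cases a.get? row <;> simp
      · rfl

theorem get?_mrReverse (row : String) (mapper : List (String × List String)) :
    (mrReverse mapper).get? row = mrFirst row mapper := by
  unfold mrReverse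
  rw [get?_mrReverse_aux]
  simp

-- ===== VERDICT (by name: the statement is the Claim_ definition above) =====
theorem multi_replace_spec : Claim_equal_multi_replace := by
  intro row mapper default _
  unfold Spec_multi_replace multi_replace multi_replace_alt
  rw [PySem.Dict.getD_eq_get?_getD, get?_mrReverse, mrLoopA_eq_first]
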